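-- pv_equiv track=rewrite | github.com/cyan-wolf/competitive_programming | matcomgrader/icpc_caribbean_qualifiers_2023/real_contest/d.py | get_losing_pairing
-- ===== SOURCE A (Python) =====
-- def get_losing_pairing(results):
--     used_knight_indices = [pair[0] for pair in results]
--     used_dragon_indices = [pair[1] for pair in results]
--
--     unused_pair = [None, None]
--
--     for i in range(3):
--         if i not in used_knight_indices:
--             unused_pair[0] = i
--         if i not in used_dragon_indices:
--             unused_pair[1] = i
--
--     return tuple(unused_pair)
-- ===== SOURCE B (Python) =====
-- # Largest unused index for used-mask m (bit i set = index i used); mask 7 = all used.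
-- _TABLE = (2, 2, 2, 2, 1, 1, 0, None)
--
-- def get_losing_pairing(results):
--     km = dm = 0
--     for k, d in results:
--         if 0 <= k < 3:
--             km |= 1 << k
--         if 0 <= d < 3:
--             dm |= 1 << d
--     return (_TABLE[km], _TABLE[dm])
-- ===== Notes on version B (the rewrite author's own statement) =====
-- stated objective: alternative
-- what changed: Replaces A's three membership scans over index lists (keeping the last unused index) with a single pass that ORs used indices into two 3-bit bitmasks, then decodes each mask through a precomputed 8-entry lookup table giving the largest unused index or None.
import Mathlib
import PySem

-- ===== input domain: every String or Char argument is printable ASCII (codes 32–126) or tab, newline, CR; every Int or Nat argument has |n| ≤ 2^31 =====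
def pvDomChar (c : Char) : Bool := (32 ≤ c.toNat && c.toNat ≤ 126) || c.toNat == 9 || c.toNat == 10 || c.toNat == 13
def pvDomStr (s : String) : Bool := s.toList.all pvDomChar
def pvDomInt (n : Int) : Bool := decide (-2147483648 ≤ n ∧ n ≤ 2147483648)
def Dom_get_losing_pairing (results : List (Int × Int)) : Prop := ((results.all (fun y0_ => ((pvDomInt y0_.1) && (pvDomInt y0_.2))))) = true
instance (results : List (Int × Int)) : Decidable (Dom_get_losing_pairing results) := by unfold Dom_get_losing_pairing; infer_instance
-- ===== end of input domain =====

-- B replaces A's per-index membership scans with one pass ORing used indices into two bitmasks, decoded by an 8-entry table (alternative decomposition, same cost).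

-- ===== PORT A =====
def get_losing_pairing (results : List (Int × Int)) : Option Int × Option Int :=
  let used_knight_indices := results.map (fun pair => pair.1)
  let used_dragon_indices := results.map (fun pair => pair.2)
  let unused_pair : Option Int × Option Int := (none, none)
  let unused_pair := (PySem.List.pyRange 0 3 1).foldl (fun (p : Option Int × Option Int) (i : Int) =>
    (if i ∉ used_knight_indices then some i else p.1,
     if i ∉ used_dragon_indices then some i else p.2)) unused_pair
  unused_pair

-- ===== PORT B =====
-- 'km |= 1 << k if 0 <= k < 3' (the shift index is guarded to 0..2, so toNat is exact here)
def pvMaskStep (m : Nat) (v : Int) : Nat :=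
  if 0 ≤ v ∧ v < 3 then m ||| (1 <<< v.toNat) else m

-- _TABLE = (2, 2, 2, 2, 1, 1, 0, None); masks produced are always < 8
def pvTable (m : Nat) : Option Int :=
  match m with
  | 0 => some 2 | 1 => some 2 | 2 => some 2 | 3 => some 2
  | 4 => some 1 | 5 => some 1 | 6 => some 0 | _ => none

def get_losing_pairing_alt (results : List (Int × Int)) : Option Int × Option Int :=
  let masks := results.foldl (fun (p : Nat × Nat) kd => (pvMaskStep p.1 kd.1, pvMaskStep p.2 kd.2)) (0, 0)
  (pvTable masks.1, pvTable masks.2)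

-- ===== PRECONDITION & SPEC =====
def Spec_get_losing_pairing (results : List (Int × Int)) (out : Option Int × Option Int) : Prop := out = get_losing_pairing_alt results
instance (results : List (Int × Int)) (out : Option Int × Option Int) : Decidable (Spec_get_losing_pairing results out) := by unfold Spec_get_losing_pairing; infer_instance

-- ===== CLAIM (what is proved, stated in full; the proofs are below) =====
def Claim_equal_get_losing_pairing : Prop := ∀ (results : List (Int × Int)), Dom_get_losing_pairing results → Spec_get_losing_pairing results (get_losing_pairing results)

-- ===== LEMMAS AND PROOFS =====

-- a pairwise foldl splits into its two components
lemma pv_foldl_pair {α β γ : Type} (f : β → α → β) (g : γ → α → γ) (l : List α) (a : β) (b : γ) :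
    l.foldl (fun (p : β × γ) i => (f p.1 i, g p.2 i)) (a, b) = (l.foldl f a, l.foldl g b) := by
  induction l generalizing a b with
  | nil => rfl
  | cons x t ih => simp [List.foldl, ih]

-- B's paired mask fold splits into its two component folds
lemma pv_mask_pair (l : List (Int × Int)) (a b : Nat) :
    l.foldl (fun (p : Nat × Nat) kd => (pvMaskStep p.1 kd.1, pvMaskStep p.2 kd.2)) (a, b)
      = (l.foldl (fun m kd => pvMaskStep m kd.1) a, l.foldl (fun m kd => pvMaskStep m kd.2) b) := by
  induction l generalizing a b with
  | nil => rfl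
  | cons x t ih => simp [List.foldl, ih]

-- the mask fold shifts over an accumulated OR
lemma pv_mask_shift (u : List Int) (a : Nat) :
    u.foldl pvMaskStep a = a ||| u.foldl pvMaskStep 0 := by
  induction u generalizing a with
  | nil => simp [List.foldl]
  | cons x t ih =>
      simp only [List.foldl]
      rw [ih (pvMaskStep a x), ih (pvMaskStep 0 x)]
      unfold pvMaskStep
      split_ifs with h
      · simp [Nat.or_assoc]
      · simp

-- the mask computed by B is determined by which of 0,1,2 occur in u
lemma pv_mask_mem (u : List Int) :
    u.foldl pvMaskStep 0 =
      ((if (0 : Int) ∈ u then 1 else 0) ||| (if (1 : Int) ∈ u then 2 else 0)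
        ||| (if (2 : Int) ∈ u then 4 else 0) : Nat) := by
  induction u with
  | nil => simp
  | cons x t ih =>
      simp only [List.foldl]
      rw [pv_mask_shift, ih]
      by_cases hx0 : x = 0
      · subst hx0
        by_cases h0 : (0 : Int) ∈ t <;> by_cases h1 : (1 : Int) ∈ t <;> by_cases h2 : (2 : Int) ∈ t <;>
          simp [pvMaskStep, h0, h1, h2, List.mem_cons]
      · by_cases hx1 : x = 1
        · subst hx1
          by_cases h0 : (0 : Int) ∈ t <;> by_cases h1 : (1 : Int) ∈ t <;> by_cases h2 : (2 : Int) ∈ t <;>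
            simp [pvMaskStep, h0, h1, h2, List.mem_cons]
        · by_cases hx2 : x = 2
          · subst hx2
            by_cases h0 : (0 : Int) ∈ t <;> by_cases h1 : (1 : Int) ∈ t <;> by_cases h2 : (2 : Int) ∈ t <;>
              simp [pvMaskStep, h0, h1, h2, List.mem_cons]
          · have hstep : pvMaskStep 0 x = 0 := by
              unfold pvMaskStep
              split_ifs with h
              · exfalso; omega
              · rfl
            rw [hstep]
            have h0x : ¬((0 : Int) = x) := fun h => hx0 h.symm
            have h1x : ¬((1 : Int) = x) := fun h => hx1 h.symm
            have h2x : ¬((2 : Int) = x) := fun h => hx2 h.symm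
            simp [List.mem_cons, h0x, h1x, h2x]

-- per component: table-decoded mask = A's overwrite scan
lemma pv_component (u : List Int) :
    pvTable (u.foldl pvMaskStep 0)
      = (PySem.List.pyRange 0 3 1).foldl
          (fun (o : Option Int) i => if i ∉ u then some i else o) none := by
  rw [pv_mask_mem]
  have hr : PySem.List.pyRange 0 3 1 = [0, 1, 2] := by decide
  rw [hr]
  by_cases h0 : (0 : Int) ∈ u <;> by_cases h1 : (1 : Int) ∈ u <;> by_cases h2 : (2 : Int) ∈ u <;>
    simp [h0, h1, h2, List.foldl, pvTable]

-- ===== VERDICT (by name: the statement is the Claim_ definition above) =====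
theorem get_losing_pairing_spec : Claim_equal_get_losing_pairing := by
  intro results _
  unfold Spec_get_losing_pairing get_losing_pairing get_losing_pairing_alt
  dsimp only
  rw [pv_mask_pair,
      pv_foldl_pair (fun o i => if i ∉ results.map (fun pair => pair.1) then some i else o)
        (fun o i => if i ∉ results.map (fun pair => pair.2) then some i else o)]
  dsimp only
  rw [show List.foldl (fun m (kd : Int × Int) => pvMaskStep m kd.1) 0 results
        = List.foldl pvMaskStep 0 (results.map (fun pair => pair.1)) from
        List.foldl_map.symm,
      show List.foldl (fun m (kd : Int × Int) => pvMaskStep m kd.2) 0 results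
        = List.foldl pvMaskStep 0 (results.map (fun pair => pair.2)) from
        List.foldl_map.symm,
      pv_component, pv_component]
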